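-- pv_equiv track=rewrite | github.com/alsgur9368/FM-Singer | utils/utils_kr.py | adjust_note_durations
-- ===== SOURCE A (Python) =====
-- def adjust_note_durations(note_durations):
--     adjusted_durations = []
--     odd_cnt = 0
--
--     for i in range(0, len(note_durations), 3):
--         inital, mid, final = note_durations[i:i+3]
--         if mid % 2 == 1:
--             odd_cnt += 1
--             if odd_cnt == 2:
--                 inital, final = 2, 2
--                 mid = mid // 2
--                 odd_cnt = 0
--             else:
--                 inital, final = 2, 1
--                 mid = mid // 2
--         else:
--             inital, final = 2, 1
--             mid = mid // 2
--         adjusted_durations.extend([inital, mid, final])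
--     return adjusted_durations
-- ===== SOURCE B (Python) =====
-- def adjust_note_durations(note_durations):
--     # Two-pass form: build the 3-element groups, then a prefix count of odd
--     # mids, then emit the output from the table (no mutating toggle counter).
--     groups = [note_durations[i:i + 3] for i in range(0, len(note_durations), 3)]
--     prefix = []
--     total = 0
--     for _, mid, _ in groups:
--         total += mid % 2
--         prefix.append(total)
--     out = []
--     for (_, mid, _), c in zip(groups, prefix):
--         out.append(2)
--         out.append(mid // 2)
--         out.append(2 if mid % 2 and c % 2 == 0 else 1)
--     return out
-- ===== Notes on version B (the rewrite author's own statement) =====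
-- stated objective: alternative
-- what changed: Replaces A's single loop with a mutating odd-counter toggle by a two-pass table form: build the 3-element groups, compute a prefix count of odd mids, then emit the output from groups+prefix with the parity test 'cumulative odd count even'.
import Mathlib
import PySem

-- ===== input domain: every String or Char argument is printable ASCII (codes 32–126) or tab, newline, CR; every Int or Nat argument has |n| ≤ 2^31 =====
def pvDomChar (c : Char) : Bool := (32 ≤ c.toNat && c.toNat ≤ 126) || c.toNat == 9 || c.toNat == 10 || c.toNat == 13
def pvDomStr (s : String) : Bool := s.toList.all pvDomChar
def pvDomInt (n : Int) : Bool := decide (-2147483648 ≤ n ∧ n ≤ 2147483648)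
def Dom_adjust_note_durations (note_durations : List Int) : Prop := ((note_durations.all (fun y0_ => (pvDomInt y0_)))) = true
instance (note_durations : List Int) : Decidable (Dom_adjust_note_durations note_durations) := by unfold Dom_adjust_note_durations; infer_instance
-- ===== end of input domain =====

-- B replaces A's mutating odd-counter loop by a groups + prefix-odd-count table and a
-- separate output pass (alternative decomposition, same cost).

-- ===== PORT A =====
-- loop over range(0, len, 3) carrying (adjusted_durations, odd_cnt); the tuple unpack of a
-- slice that is not 3-long raises ValueError in Python (excluded by Pre_), the port skips there.
def adjust_note_durations (note_durations : List Int) : List Int :=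
  ((PySem.List.pyRange 0 (note_durations.length : Int) 3).foldl
    (fun (s : List Int × Int) i =>
      match PySem.List.slice note_durations (some i) (some (i + 3)) with
      | [_, m, _] =>
        if PySem.Int.mod m 2 = 1 then
          if s.2 + 1 = 2 then (s.1 ++ [2, PySem.Int.floordiv m 2, 2], 0)
          else (s.1 ++ [2, PySem.Int.floordiv m 2, 1], s.2 + 1)
        else (s.1 ++ [2, PySem.Int.floordiv m 2, 1], s.2)
      | _ => s)
    ([], 0)).1

-- ===== PORT B =====
-- Source B: groups comprehension, prefix odd-count loop, output loop over zip(groups, prefix).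
-- pvUnpack3 is the 3-tuple unpack '_, mid, _ = g' (none = ValueError, outside Pre_; the folds skip there).
def pvUnpack3 (g : List Int) : Option (Int × Int × Int) :=
  if h : g.length = 3 then some (g[0], g[1], g[2]) else none

def adjust_note_durations_alt (note_durations : List Int) : List Int :=
  let groups := (PySem.List.pyRange 0 (note_durations.length : Int) 3).map
    (fun i => PySem.List.slice note_durations (some i) (some (i + 3)))
  let prefixTbl := (groups.foldl
    (fun (p : List Int × Int) g =>
      match pvUnpack3 g with
      | some (_, m, _) => (p.1 ++ [p.2 + PySem.Int.mod m 2], p.2 + PySem.Int.mod m 2)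
      | none => p)
    ([], 0)).1
  (groups.zip prefixTbl).foldl
    (fun (out : List Int) gc =>
      match pvUnpack3 gc.1 with
      | some (_, m, _) =>
        out ++ [2, PySem.Int.floordiv m 2,
                if PySem.Int.mod m 2 ≠ 0 ∧ PySem.Int.mod gc.2 2 = 0 then 2 else 1]
      | none => out)
    []

-- ===== PRECONDITION & SPEC =====
-- Pre_ excludes exactly the inputs whose length is not a multiple of 3: there A's
-- tuple unpacking of the short final slice raises ValueError (B raises too).
def Pre_adjust_note_durations (note_durations : List Int) : Prop :=
  note_durations.length % 3 = 0
instance (note_durations : List Int) : Decidable (Pre_adjust_note_durations note_durations) := by unfold Pre_adjust_note_durations; infer_instance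

def pvWitness_adjust_note_durations : List Int := [1, 3, 1, 2, 5, 1, 1, 4, 2]

def Spec_adjust_note_durations (note_durations : List Int) (out : List Int) : Prop := out = adjust_note_durations_alt note_durations
instance (note_durations : List Int) (out : List Int) : Decidable (Spec_adjust_note_durations note_durations out) := by unfold Spec_adjust_note_durations; infer_instance

-- ===== CLAIM (what is proved, stated in full; the proofs are below) =====
def Claim_equal_adjust_note_durations : Prop := ∀ (note_durations : List Int), Dom_adjust_note_durations note_durations → Pre_adjust_note_durations note_durations → Spec_adjust_note_durations note_durations (adjust_note_durations note_durations)

-- ===== LEMMAS AND PROOFS =====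

-- Reference emission: one recursive pass over the groups carrying the running odd total t.
def pvEmit : List (List Int) → Int → List Int
  | [], _ => []
  | g :: gs, t =>
    match g with
    | [_, m, _] =>
      [2, PySem.Int.floordiv m 2,
       if PySem.Int.mod m 2 ≠ 0 ∧ PySem.Int.mod (t + PySem.Int.mod m 2) 2 = 0 then 2 else 1]
        ++ pvEmit gs (t + PySem.Int.mod m 2)
    | _ => pvEmit gs t

-- Reference prefix table from running total t.
def pvPref : List (List Int) → Int → List Int
  | [], _ => []
  | g :: gs, t =>
    match g with
    | [_, m, _] => (t + PySem.Int.mod m 2) :: pvPref gs (t + PySem.Int.mod m 2)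
    | _ => pvPref gs t

theorem pvUnpack3_cons3 (a m c : Int) : pvUnpack3 [a, m, c] = some (a, m, c) := rfl

theorem pv_mod_succ_of_zero (t : Int) (h : PySem.Int.mod t 2 = 0) :
    PySem.Int.mod (t + 1) 2 = 1 := by
  rw [PySem.Int.mod_eq_emod_of_pos (by norm_num)] at h ⊢; omega

theorem pv_mod_succ_of_one (t : Int) (h : PySem.Int.mod t 2 = 1) :
    PySem.Int.mod (t + 1) 2 = 0 := by
  rw [PySem.Int.mod_eq_emod_of_pos (by norm_num)] at h ⊢; omega

-- The prefix-building fold of B computes pvPref.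
theorem pvPref_spec (gs : List (List Int))
    (hgs : ∀ g ∈ gs, ∃ a m c, g = [a, m, c]) (acc : List Int) (t : Int) :
    (gs.foldl
      (fun (p : List Int × Int) g =>
        match pvUnpack3 g with
        | some (_, m, _) => (p.1 ++ [p.2 + PySem.Int.mod m 2], p.2 + PySem.Int.mod m 2)
        | none => p)
      (acc, t)).1 = acc ++ pvPref gs t := by
  induction gs generalizing acc t with
  | nil => simp [pvPref]
  | cons g gs ih =>
    obtain ⟨a, m, c, rfl⟩ := hgs _ (List.mem_cons_self ..)
    have hgs' : ∀ g ∈ gs, ∃ a m c, g = [a, m, c] := fun g hg => hgs g (List.mem_cons_of_mem _ hg)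
    simp only [List.foldl_cons, pvUnpack3_cons3, pvPref]
    rw [ih hgs']
    simp

-- The output fold of B over zip(groups, prefix) computes pvEmit.
theorem pvOut_spec (gs : List (List Int))
    (hgs : ∀ g ∈ gs, ∃ a m c, g = [a, m, c]) (acc : List Int) (t : Int) :
    ((gs.zip (pvPref gs t)).foldl
      (fun (out : List Int) gc =>
        match pvUnpack3 gc.1 with
        | some (_, m, _) =>
          out ++ [2, PySem.Int.floordiv m 2,
                  if PySem.Int.mod m 2 ≠ 0 ∧ PySem.Int.mod gc.2 2 = 0 then 2 else 1]
        | none => out)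
      acc) = acc ++ pvEmit gs t := by
  induction gs generalizing acc t with
  | nil => simp [pvEmit]
  | cons g gs ih =>
    obtain ⟨a, m, c, rfl⟩ := hgs _ (List.mem_cons_self ..)
    have hgs' : ∀ g ∈ gs, ∃ a m c, g = [a, m, c] := fun g hg => hgs g (List.mem_cons_of_mem _ hg)
    simp only [pvPref, pvEmit, List.zip_cons_cons, List.foldl_cons, pvUnpack3_cons3]
    rw [ih hgs']
    simp

-- A's fold over the index list, with its odd counter equal to the parity of the
-- running odd total t, computes pvEmit of the corresponding groups.
theorem pvA_spec (xs : List Int) (L : List Int)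
    (hL : ∀ i ∈ L, ∃ a m c, PySem.List.slice xs (some i) (some (i + 3)) = [a, m, c])
    (acc : List Int) (k t : Int) (hk : k = PySem.Int.mod t 2) :
    (L.foldl
      (fun (s : List Int × Int) i =>
        match PySem.List.slice xs (some i) (some (i + 3)) with
        | [_, m, _] =>
          if PySem.Int.mod m 2 = 1 then
            if s.2 + 1 = 2 then (s.1 ++ [2, PySem.Int.floordiv m 2, 2], 0)
            else (s.1 ++ [2, PySem.Int.floordiv m 2, 1], s.2 + 1)
          else (s.1 ++ [2, PySem.Int.floordiv m 2, 1], s.2)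
        | _ => s)
      (acc, k)).1
    = acc ++ pvEmit (L.map (fun i => PySem.List.slice xs (some i) (some (i + 3)))) t := by
  induction L generalizing acc k t with
  | nil => simp [pvEmit]
  | cons i L ih =>
    obtain ⟨a, m, c, hs⟩ := hL _ (List.mem_cons_self ..)
    have hL' : ∀ i ∈ L, ∃ a m c, PySem.List.slice xs (some i) (some (i + 3)) = [a, m, c] :=
      fun j hj => hL j (List.mem_cons_of_mem _ hj)
    simp only [List.foldl_cons, List.map_cons, hs, pvEmit]
    rcases PySem.Int.mod_two_eq m with hm | hm
    · rw [if_neg (by rw [hm]; norm_num),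
        if_neg (fun h => h.1 hm), hm, add_zero,
        ih hL' (acc ++ [2, PySem.Int.floordiv m 2, 1]) k t hk]
      simp
    · rw [if_pos hm, hm]
      rcases PySem.Int.mod_two_eq t with ht | ht
      · rw [hk, ht]
        have h1 := pv_mod_succ_of_zero t ht
        rw [if_neg (by norm_num), if_neg (fun h => by rw [h1] at h; exact absurd h.2 (by norm_num)),
          ih hL' (acc ++ [2, PySem.Int.floordiv m 2, 1]) (0 + 1) (t + 1) (by rw [h1]; norm_num)]
        simp
      · rw [hk, ht]
        have h0 := pv_mod_succ_of_one t ht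
        rw [if_pos (by norm_num), if_pos ⟨by norm_num, h0⟩,
          ih hL' (acc ++ [2, PySem.Int.floordiv m 2, 2]) 0 (t + 1) h0.symm]
        simp

-- Under Pre_, every slice xs[i:i+3] for i in range(0, len, 3) has exactly 3 elements.
theorem pv_slices_shape (xs : List Int) (hpre : xs.length % 3 = 0) :
    ∀ i ∈ PySem.List.pyRange 0 (xs.length : Int) 3,
      ∃ a m c, PySem.List.slice xs (some i) (some (i + 3)) = [a, m, c] := by
  intro i hi
  rw [PySem.List.mem_pyRange_iff_of_pos (by norm_num)] at hi
  obtain ⟨h0, hlt, hdvd⟩ := hi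
  have hlen : ((xs.length : Int)) % 3 = 0 := by omega
  have hle : i + 3 ≤ (xs.length : Int) := by omega
  have h3 : (PySem.List.slice xs (some i) (some (i + 3))).length = 3 := by
    rw [PySem.List.slice_toNat xs h0 (by omega)]
    simp only [List.length_take, List.length_drop]
    omega
  exact List.length_eq_three.mp h3

-- ===== VERDICT (by name: the statement is the Claim_ definition above) =====
theorem adjust_note_durations_spec : Claim_equal_adjust_note_durations := by
  intro xs _ hpre
  simp only [Spec_adjust_note_durations, adjust_note_durations, adjust_note_durations_alt]
  have hshape := pv_slices_shape xs hpre
  have hgs : ∀ g ∈ (PySem.List.pyRange 0 (xs.length : Int) 3).map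
      (fun i => PySem.List.slice xs (some i) (some (i + 3))), ∃ a m c, g = [a, m, c] := by
    intro g hg
    obtain ⟨i, hi, rfl⟩ := List.mem_map.1 hg
    exact hshape i hi
  rw [pvA_spec xs _ hshape [] 0 0 (by decide),
    pvPref_spec _ hgs [] 0, List.nil_append (pvPref _ 0), pvOut_spec _ hgs [] 0]
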